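-- pv_equiv track=rewrite | github.com/Clematrics/PyBuddhabrot | buddhabrot_gui.py | encode
-- ===== SOURCE A (Python) =====
-- def encode(arr):
-- 	buffer = []
-- 	zeros = 0
-- 	for k in arr:
-- 		if k:
-- 			if zeros:
-- 				buffer.extend([0, zeros])
-- 				zeros = 0
-- 			buffer.append(k)
-- 		else:
-- 			zeros += 1
-- 	return buffer
-- ===== SOURCE B (Python) =====
-- def encode(arr):
--     out = []
--     i, n = 0, len(arr)
--     while i < n:
--         if arr[i]:
--             out.append(arr[i])
--             i += 1
--         else:
--             j = i
--             while j < n and not arr[j]: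
--                 j += 1
--             if j < n:
--                 out.extend([0, j - i])
--             i = j
--     return out
-- ===== Notes on version B (the rewrite author's own statement) =====
-- stated objective: alternative
-- what changed: Replaces A's element-by-element fold with a pending-zero counter and flush flag by an index/run-based scan: each maximal zero run is skipped in one inner loop and emitted as a single [0, runlength] pair (or dropped if trailing), nonzero elements are copied directly; no pending state is carried across iterations.
import Mathlib
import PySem

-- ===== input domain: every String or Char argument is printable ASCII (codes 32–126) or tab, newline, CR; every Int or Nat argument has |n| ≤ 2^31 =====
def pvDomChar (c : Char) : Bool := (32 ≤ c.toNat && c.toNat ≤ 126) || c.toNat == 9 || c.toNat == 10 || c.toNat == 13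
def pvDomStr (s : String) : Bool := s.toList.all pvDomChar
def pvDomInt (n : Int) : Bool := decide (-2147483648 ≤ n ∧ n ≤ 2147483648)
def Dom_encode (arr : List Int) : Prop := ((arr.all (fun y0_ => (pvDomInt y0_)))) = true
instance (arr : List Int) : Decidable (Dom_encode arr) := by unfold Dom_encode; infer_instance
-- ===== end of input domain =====

-- B replaces A's pending-zero-counter fold by a run-based scan (skip each maximal
-- zero run at once, emit [0, runlength] unless trailing); alternative decomposition, same cost.

-- ===== PORT A =====
-- literal port of A: fold over elements carrying (buffer, zeros)
def encode (arr : List Int) : List Int :=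
  (arr.foldl
    (fun (s : List Int × Int) k =>
      if k ≠ 0 then
        ((if s.2 ≠ 0 then s.1 ++ [0, s.2] else s.1) ++ [k], 0)
      else
        (s.1, s.2 + 1))
    ([], 0)).1

-- ===== PORT B =====
-- literal port of Source B: outer scan; a zero run is consumed by the inner scan
-- (the `while j < n and not arr[j]` loop = takeWhile/dropWhile on the remainder)
def encode_alt : List Int → List Int
  | [] => []
  | x :: xs =>
    if x ≠ 0 then x :: encode_alt xs
    else
      let rest := xs.dropWhile (fun y => y == 0)
      if rest.isEmpty then []
      else 0 :: (((xs.takeWhile (fun y => y == 0)).length : Int) + 1) :: encode_alt rest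
termination_by l => l.length
decreasing_by
  · simp
  · have := List.length_dropWhile_le (fun y => y == 0) xs
    simp only [List.length_cons]; omega

-- ===== PRECONDITION & SPEC =====
def Spec_encode (arr : List Int) (out : List Int) : Prop := out = encode_alt arr
instance (arr : List Int) (out : List Int) : Decidable (Spec_encode arr out) := by unfold Spec_encode; infer_instance

-- ===== CLAIM (what is proved, stated in full; the proofs are below) =====
def Claim_equal_encode : Prop := ∀ (arr : List Int), Dom_encode arr → Spec_encode arr (encode arr)

-- ===== LEMMAS AND PROOFS =====

-- proof-only intermediate: A's loop with pending zero count z, output-ahead form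
def pvAux (z : Int) : List Int → List Int
  | [] => []
  | x :: xs =>
    if x ≠ 0 then (if z ≠ 0 then [0, z] else []) ++ x :: pvAux 0 xs
    else pvAux (z + 1) xs

-- proof-only name for A's loop body
def pvStep (s : List Int × Int) (k : Int) : List Int × Int :=
  if k ≠ 0 then
    ((if s.2 ≠ 0 then s.1 ++ [0, s.2] else s.1) ++ [k], 0)
  else
    (s.1, s.2 + 1)

theorem pvEncode_eq_step (arr : List Int) :
    encode arr = (arr.foldl pvStep ([], 0)).1 := rfl

theorem pvFoldl_eq_aux (arr : List Int) : ∀ (buf : List Int) (z : Int),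
    (arr.foldl pvStep (buf, z)).1 = buf ++ pvAux z arr := by
  induction arr with
  | nil => intro buf z; simp [pvAux]
  | cons x xs ih =>
    intro buf z
    rw [List.foldl_cons]
    by_cases hx : x = 0
    · rw [show pvStep (buf, z) x = (buf, z + 1) from by simp [pvStep, hx]]
      rw [ih]; simp [pvAux, hx]
    · by_cases hz : z = 0
      · rw [show pvStep (buf, z) x = (buf ++ [x], 0) from by simp [pvStep, hx, hz]]
        rw [ih]; simp [pvAux, hx, hz]
      · rw [show pvStep (buf, z) x = (buf ++ [0, z] ++ [x], 0) from by
          simp [pvStep, hx, hz]]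
        rw [ih]; simp [pvAux, hx, hz]

theorem pvAux_eq_alt : ∀ (n : Nat) (arr : List Int), arr.length ≤ n →
    (pvAux 0 arr = encode_alt arr) ∧
    (∀ z : Int, 0 < z → pvAux z arr =
      (if (arr.dropWhile (fun y => y == 0)).isEmpty then []
       else 0 :: (z + ((arr.takeWhile (fun y => y == 0)).length : Int)) ::
            encode_alt (arr.dropWhile (fun y => y == 0)))) := by
  intro n
  induction n with
  | zero =>
    intro arr h
    have : arr = [] := List.eq_nil_of_length_eq_zero (Nat.le_zero.mp h)
    subst this
    exact ⟨by simp [pvAux, encode_alt], fun z _ => by simp [pvAux]⟩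
  | succ n ih =>
    intro arr h
    cases arr with
    | nil => exact ⟨by simp [pvAux, encode_alt], fun z _ => by simp [pvAux]⟩
    | cons x xs =>
      have hlen : xs.length ≤ n := by simpa using h
      have hrest : (xs.dropWhile (fun y => y == 0)).length ≤ n := by
        have := List.length_dropWhile_le (fun y => y == 0) xs
        omega
      constructor
      · by_cases hx : x = 0
        · subst hx
          have h2 := (ih xs hlen).2 1 (by norm_num)
          simp only [pvAux, if_neg (by simp : ¬((0:Int) ≠ 0))]
          rw [show (0:Int) + 1 = 1 by ring, h2]
          simp only [encode_alt, if_neg (by simp : ¬((0:Int) ≠ 0))]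
          split <;> simp [Int.add_comm]
        · have h1 := (ih xs hlen).1
          simp [pvAux, hx, encode_alt, h1]
      · intro z hz
        by_cases hx : x = 0
        · subst hx
          have h2 := (ih xs hlen).2 (z + 1) (by omega)
          simp only [pvAux, if_neg (by simp : ¬((0:Int) ≠ 0)), h2]
          simp only [List.dropWhile_cons, List.takeWhile_cons, beq_self_eq_true, if_true]
          split <;> simp <;> ring
        · have h1 := (ih xs hlen).1
          have hz' : z ≠ 0 := by omega
          simp only [pvAux, if_pos hx, if_pos hz', h1]
          have hb : (x == (0:Int)) = false := by simpa using hx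
          simp [List.dropWhile_cons, List.takeWhile_cons, hb, encode_alt, hx]

-- ===== VERDICT (by name: the statement is the Claim_ definition above) =====
theorem encode_spec : Claim_equal_encode := by
  intro arr _
  show encode arr = encode_alt arr
  rw [pvEncode_eq_step, pvFoldl_eq_aux, (pvAux_eq_alt arr.length arr le_rfl).1]
  simp
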